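-- pv_equiv track=rewrite | github.com/SergioSboy/algorithms_and_data_structures | Экзамен Python-разработчик/1.py | max_mark
-- ===== SOURCE A (Python) =====
-- def max_mark(n, m):
--     if n < 7:
--         return -1
--     else:
--         M = -1
--         for i in range(n - 6):
--             maxim = 0
--             flag = False
--             for j in range(7):
--                 if m[i + j] == 2 or m[i + j] == 3:
--                     flag = True
--                     break
--                 if m[i + j] == 5:
--                     maxim += 1
--             if maxim >= M and flag == False:
--                 M = maxim
--     return M
-- ===== SOURCE B (Python) =====
-- def max_mark(n, m):
--     if n < 7:
--         return -1
--     fives = sum(1 for x in m[:7] if x == 5)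
--     bad = sum(1 for x in m[:7] if x == 2 or x == 3)
--     M = fives if bad == 0 else -1
--     for i in range(1, n - 6):
--         out, inc = m[i - 1], m[i + 6]
--         fives += (1 if inc == 5 else 0) - (1 if out == 5 else 0)
--         bad += (1 if inc == 2 or inc == 3 else 0) - (1 if out == 2 or out == 3 else 0)
--         if bad == 0 and fives > M:
--             M = fives
--     return M
-- ===== Notes on version B (the rewrite author's own statement) =====
-- stated objective: faster
-- what changed: Replaces the nested per-window rescan (with early break on a 2/3) by a single-pass sliding window that maintains running counts of 5s and of 2s/3s, updating them with the outgoing and incoming element of each shift.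
-- outside the precondition, e.g. on max_mark(8, [2, 2, 2, 2, 2, 2, 2]): A returns -1, B raises IndexError
import Mathlib
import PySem

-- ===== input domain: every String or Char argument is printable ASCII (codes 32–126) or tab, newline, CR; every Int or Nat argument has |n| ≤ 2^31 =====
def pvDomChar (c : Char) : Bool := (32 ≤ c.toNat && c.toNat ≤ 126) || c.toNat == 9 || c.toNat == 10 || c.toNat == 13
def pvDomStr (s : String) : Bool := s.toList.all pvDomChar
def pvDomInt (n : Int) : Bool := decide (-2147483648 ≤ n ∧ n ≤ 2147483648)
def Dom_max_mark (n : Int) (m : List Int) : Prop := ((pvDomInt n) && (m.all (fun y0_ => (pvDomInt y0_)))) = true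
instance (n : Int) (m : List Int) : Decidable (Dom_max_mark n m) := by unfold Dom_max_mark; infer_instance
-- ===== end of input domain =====

-- B replaces A's per-window rescan by a single-pass sliding window with running counts of 5s and 2s/3s (measured faster in a timing run).


-- ===== PORT A =====
-- the inner 'for j in range(7)' with its break, carrying 'maxim'; returns (maxim, flag)
def mmInner (m : List Int) (i : Int) : List Int → Int → Int × Bool
  | [], maxim => (maxim, false)
  | j :: js, maxim =>
    let v := (PySem.List.pyGet? m (i + j)).getD 0   -- m[i+j]; Pre_ keeps it in range
    if v = 2 ∨ v = 3 then (maxim, true)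
    else if v = 5 then mmInner m i js (maxim + 1)
    else mmInner m i js maxim

def max_mark (n : Int) (m : List Int) : Int :=
  if n < 7 then -1
  else
    (PySem.List.pyRange 0 (n - 6) 1).foldl (fun M i =>
      let r := mmInner m i (PySem.List.pyRange 0 7 1) 0
      if r.1 ≥ M ∧ r.2 = false then r.1 else M) (-1)

-- ===== PORT B =====
-- one iteration of Source B's sliding loop; state = (fives, bad, M)
def mmStep (m : List Int) (st : Int × Int × Int) (i : Int) : Int × Int × Int :=
  let outv := (PySem.List.pyGet? m (i - 1)).getD 0   -- m[i-1]
  let inv  := (PySem.List.pyGet? m (i + 6)).getD 0   -- m[i+6]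
  let fives := st.1 + (if inv = 5 then 1 else 0) - (if outv = 5 then 1 else 0)
  let bad := st.2.1 + (if inv = 2 ∨ inv = 3 then 1 else 0) - (if outv = 2 ∨ outv = 3 then 1 else 0)
  let M := if bad = 0 ∧ fives > st.2.2 then fives else st.2.2
  (fives, bad, M)

def max_mark_alt (n : Int) (m : List Int) : Int :=
  if n < 7 then -1
  else
    let w := PySem.List.slice m none (some 7)        -- m[:7]
    let fives0 : Int := w.foldl (fun a x => a + (if x = 5 then 1 else 0)) 0
    let bad0 : Int := w.foldl (fun a x => a + (if x = 2 ∨ x = 3 then 1 else 0)) 0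
    let M0 : Int := if bad0 = 0 then fives0 else -1
    ((PySem.List.pyRange 1 (n - 6) 1).foldl (mmStep m) (fives0, bad0, M0)).2.2

-- ===== PRECONDITION & SPEC =====
-- Pre_ excludes n ≥ 7 with fewer than n marks: there A may still return -1 because its
-- early break on a 2/3 masks the out-of-range index, while B's sliding window reads all n elements and raises.
def Pre_max_mark (n : Int) (m : List Int) : Prop := n < 7 ∨ n ≤ m.length
instance (n : Int) (m : List Int) : Decidable (Pre_max_mark n m) := by unfold Pre_max_mark; infer_instance
def pvWitness_max_mark : Int × List Int := (7, [5, 1, 5, 4, 1, 5, 1])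

def Spec_max_mark (n : Int) (m : List Int) (out : Int) : Prop := out = max_mark_alt n m
instance (n : Int) (m : List Int) (out : Int) : Decidable (Spec_max_mark n m out) := by unfold Spec_max_mark; infer_instance

-- ===== CLAIM (what is proved, stated in full; the proofs are below) =====
def Claim_equal_max_mark : Prop := ∀ (n : Int) (m : List Int), Dom_max_mark n m → Pre_max_mark n m → Spec_max_mark n m (max_mark n m)

-- ===== LEMMAS AND PROOFS =====
-- value at index k (0 on out-of-range, unreachable under Pre_)
def mmV (m : List Int) (k : Int) : Int := (PySem.List.pyGet? m k).getD 0
def i5 (x : Int) : Int := if x = 5 then 1 else 0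
def ib (x : Int) : Int := if x = 2 ∨ x = 3 then 1 else 0
-- count of 5s / of 2s-3s in the window of 7 starting at i
def wF (m : List Int) (i : Int) : Int :=
  i5 (mmV m i) + i5 (mmV m (i+1)) + i5 (mmV m (i+2)) + i5 (mmV m (i+3)) + i5 (mmV m (i+4)) + i5 (mmV m (i+5)) + i5 (mmV m (i+6))
def wB (m : List Int) (i : Int) : Int :=
  ib (mmV m i) + ib (mmV m (i+1)) + ib (mmV m (i+2)) + ib (mmV m (i+3)) + ib (mmV m (i+4)) + ib (mmV m (i+5)) + ib (mmV m (i+6))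
-- common step: take the new max of 5-counts if the window is valid
def gstep (m : List Int) (M i : Int) : Int := if wB m i = 0 then max M (wF m i) else M

lemma wF_nonneg (m : List Int) (i : Int) : 0 ≤ wF m i := by
  unfold wF i5; split_ifs <;> omega

lemma ib_cases (x : Int) : ib x = 0 ∨ ib x = 1 := by unfold ib; split_ifs <;> simp

lemma pyRange07 : PySem.List.pyRange 0 7 1 = [0, 1, 2, 3, 4, 5, 6] := by
  rw [PySem.List.pyRange_one]
  decide

-- specification of the inner loop of A
lemma mmInner_spec (m : List Int) (i : Int) : ∀ (js : List Int) (acc : Int),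
    ((js.map (fun j => ib (mmV m (i + j)))).sum = 0 →
      mmInner m i js acc = (acc + (js.map (fun j => i5 (mmV m (i + j)))).sum, false)) ∧
    ((js.map (fun j => ib (mmV m (i + j)))).sum ≠ 0 → (mmInner m i js acc).2 = true) := by
  intro js
  induction js with
  | nil => intro acc; simp [mmInner]
  | cons j js ih =>
    intro acc
    have hnn : 0 ≤ (js.map (fun j => ib (mmV m (i + j)))).sum := by
      apply List.sum_nonneg; intro x hx
      simp only [List.mem_map] at hx
      obtain ⟨y, _, rfl⟩ := hx
      rcases ib_cases (mmV m (i + y)) with h | h <;> omega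
    have hg : (PySem.List.pyGet? m (i + j)).getD 0 = mmV m (i + j) := rfl
    constructor
    · intro hsum
      simp only [List.map_cons, List.sum_cons] at hsum
      have hb0 : ib (mmV m (i + j)) = 0 := by
        rcases ib_cases (mmV m (i + j)) with h | h <;> omega
      have hrest : (js.map (fun j => ib (mmV m (i + j)))).sum = 0 := by omega
      have hnb : ¬ (mmV m (i + j) = 2 ∨ mmV m (i + j) = 3) := by
        intro h; simp [ib, h] at hb0
      simp only [mmInner, hg]
      rw [if_neg hnb]
      by_cases h5 : mmV m (i + j) = 5
      · rw [if_pos h5, (ih (acc + 1)).1 hrest]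
        simp only [List.map_cons, List.sum_cons, Prod.mk.injEq, and_true]
        have : i5 (mmV m (i + j)) = 1 := by simp [i5, h5]
        rw [this]; ring
      · rw [if_neg h5, (ih acc).1 hrest]
        simp only [List.map_cons, List.sum_cons, Prod.mk.injEq, and_true]
        have : i5 (mmV m (i + j)) = 0 := by simp [i5, h5]
        rw [this]; ring
    · intro hsum
      simp only [List.map_cons, List.sum_cons] at hsum
      simp only [mmInner, hg]
      by_cases hb : mmV m (i + j) = 2 ∨ mmV m (i + j) = 3
      · rw [if_pos hb]
      · rw [if_neg hb]
        have hb0 : ib (mmV m (i + j)) = 0 := by simp [ib, hb]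
        have hrest : (js.map (fun j => ib (mmV m (i + j)))).sum ≠ 0 := by omega
        by_cases h5 : mmV m (i + j) = 5
        · rw [if_pos h5]; exact (ih (acc + 1)).2 hrest
        · rw [if_neg h5]; exact (ih acc).2 hrest

lemma sum_map7_ib (m : List Int) (i : Int) :
    (([0,1,2,3,4,5,6] : List Int).map (fun j => ib (mmV m (i + j)))).sum = wB m i := by
  simp [wB, List.map_cons, List.sum_cons, add_zero]
  ring

lemma sum_map7_i5 (m : List Int) (i : Int) :
    (([0,1,2,3,4,5,6] : List Int).map (fun j => i5 (mmV m (i + j)))).sum = wF m i := by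
  simp [wF, List.map_cons, List.sum_cons, add_zero]
  ring

-- A's outer step equals gstep
lemma astep_eq (m : List Int) (M i : Int) :
    (let r := mmInner m i (PySem.List.pyRange 0 7 1) 0
     if r.1 ≥ M ∧ r.2 = false then r.1 else M) = gstep m M i := by
  rw [pyRange07]
  by_cases h : wB m i = 0
  · have hsum : (([0,1,2,3,4,5,6] : List Int).map (fun j => ib (mmV m (i + j)))).sum = 0 := by
      rw [sum_map7_ib]; exact h
    have := (mmInner_spec m i [0,1,2,3,4,5,6] 0).1 hsum
    simp only [this, sum_map7_i5, zero_add]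
    unfold gstep
    rw [if_pos h]
    by_cases hge : wF m i ≥ M
    · simp [hge]
    · have hle : wF m i ≤ M := le_of_lt (not_le.mp hge)
      simp [hge, max_eq_left hle]
  · have hsum : (([0,1,2,3,4,5,6] : List Int).map (fun j => ib (mmV m (i + j)))).sum ≠ 0 := by
      rw [sum_map7_ib]; exact h
    have := (mmInner_spec m i [0,1,2,3,4,5,6] 0).2 hsum
    unfold gstep
    simp [this, h]

lemma foldl_astep (m : List Int) : ∀ (l : List Int) (M : Int),
    l.foldl (fun M i =>
      let r := mmInner m i (PySem.List.pyRange 0 7 1) 0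
      if r.1 ≥ M ∧ r.2 = false then r.1 else M) M = l.foldl (gstep m) M := by
  intro l M
  simp only [astep_eq]

-- sliding identities
lemma wF_slide (m : List Int) (a : Int) :
    wF m (a + 1) = wF m a + i5 (mmV m (a + 7)) - i5 (mmV m a) := by
  unfold wF
  have e2 : a + 1 + 1 = a + 2 := by ring
  have e3 : a + 1 + 2 = a + 3 := by ring
  have e4 : a + 1 + 3 = a + 4 := by ring
  have e5 : a + 1 + 4 = a + 5 := by ring
  have e6 : a + 1 + 5 = a + 6 := by ring
  have e7 : a + 1 + 6 = a + 7 := by ring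
  rw [e2, e3, e4, e5, e6, e7]; ring

lemma wB_slide (m : List Int) (a : Int) :
    wB m (a + 1) = wB m a + ib (mmV m (a + 7)) - ib (mmV m a) := by
  unfold wB
  have e2 : a + 1 + 1 = a + 2 := by ring
  have e3 : a + 1 + 2 = a + 3 := by ring
  have e4 : a + 1 + 3 = a + 4 := by ring
  have e5 : a + 1 + 4 = a + 5 := by ring
  have e6 : a + 1 + 5 = a + 6 := by ring
  have e7 : a + 1 + 6 = a + 7 := by ring
  rw [e2, e3, e4, e5, e6, e7]; ring

-- B's step from the correct state produces the correct next state and the gstep max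
lemma mmStep_eq (m : List Int) (a M : Int) :
    mmStep m (wF m (a - 1), wB m (a - 1), M) a = (wF m a, wB m a, gstep m M a) := by
  unfold mmStep gstep
  have hf : wF m a = wF m (a - 1) + (if mmV m (a + 6) = 5 then 1 else 0) - (if mmV m (a - 1) = 5 then 1 else 0) := by
    have := wF_slide m (a - 1)
    simp only [sub_add_cancel] at this
    rw [this]
    have : a - 1 + 7 = a + 6 := by ring
    rw [this]; unfold i5; ring
  have hb : wB m a = wB m (a - 1) + (if mmV m (a + 6) = 2 ∨ mmV m (a + 6) = 3 then 1 else 0)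
      - (if mmV m (a - 1) = 2 ∨ mmV m (a - 1) = 3 then 1 else 0) := by
    have := wB_slide m (a - 1)
    simp only [sub_add_cancel] at this
    rw [this]
    have : a - 1 + 7 = a + 6 := by ring
    rw [this]; unfold ib; ring
  simp only [mmV] at hf hb
  simp only [Prod.mk.injEq]
  refine ⟨hf.symm, hb.symm, ?_⟩
  rw [hf, hb]
  simp only [max_def]
  split_ifs <;> omega

-- the loop invariant: B's fold from the state after window a-1 yields the gstep fold
lemma loop_inv (m : List Int) : ∀ (k : Nat) (a M : Int),
    ((PySem.List.pyRange a (a + k) 1).foldl (mmStep m) (wF m (a - 1), wB m (a - 1), M)).2.2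
      = (PySem.List.pyRange a (a + k) 1).foldl (gstep m) M := by
  intro k
  induction k with
  | zero =>
    intro a M
    simp only [Nat.cast_zero, add_zero]
    have h : PySem.List.pyRange a a 1 = [] := by
      rw [PySem.List.pyRange_one]; simp
    rw [h]
    rfl
  | succ k ih =>
    intro a M
    have hlt : a < a + (k + 1 : Nat) := by push_cast; omega
    rw [PySem.List.pyRange_one_cons hlt]
    simp only [List.foldl_cons, mmStep_eq]
    have : a + ((k : Int) + 1) = (a + 1) + k := by ring
    have hr : PySem.List.pyRange (a + 1) (a + ((k + 1 : Nat) : Int)) 1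
        = PySem.List.pyRange (a + 1) ((a + 1) + (k : Nat)) 1 := by
      push_cast; rw [show a + ((k : Int) + 1) = (a + 1) + k from by ring]
    rw [hr]
    have := ih (a + 1) (gstep m M a)
    simpa using this

-- initial state: with 7 ≤ m.length, the counts over m[:7] are the window-0 counts
lemma mmV_zero_cons (x : Int) (xs : List Int) : mmV (x :: xs) 0 = x := by
  simp [mmV]

lemma mmV_pos (x : Int) (xs : List Int) (k : Int) (hk : 0 < k) :
    mmV (x :: xs) k = mmV xs (k - 1) := by
  unfold mmV
  obtain ⟨j, rfl⟩ : ∃ j : Nat, k = (j : Int) + 1 := ⟨(k - 1).toNat, by omega⟩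
  rw [PySem.List.pyGet?_cons_succ]
  norm_num

lemma init_state (m : List Int) (h7 : 7 ≤ m.length) :
    ((PySem.List.slice m none (some 7)).foldl (fun a x => a + (if x = 5 then 1 else 0)) 0 = wF m 0)
    ∧ ((PySem.List.slice m none (some 7)).foldl (fun a x => a + (if x = 2 ∨ x = 3 then 1 else 0)) 0 = wB m 0) := by
  match m, h7 with
  | a :: b :: c :: d :: e :: f :: g :: rest, _ =>
    have hs : PySem.List.slice (a :: b :: c :: d :: e :: f :: g :: rest) none (some 7)
        = [a, b, c, d, e, f, g] := by
      rw [show ((7 : Int)) = ((7 : Nat) : Int) from rfl, PySem.List.slice_to_natCast]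
      rfl
    rw [hs]
    have v0 : mmV (a :: b :: c :: d :: e :: f :: g :: rest) 0 = a := mmV_zero_cons _ _
    have v1 : mmV (a :: b :: c :: d :: e :: f :: g :: rest) 1 = b := by
      rw [mmV_pos _ _ 1 (by norm_num)]; norm_num [mmV_zero_cons]
    have v2 : mmV (a :: b :: c :: d :: e :: f :: g :: rest) 2 = c := by
      rw [mmV_pos _ _ 2 (by norm_num)]; norm_num [mmV_pos, mmV_zero_cons]
    have v3 : mmV (a :: b :: c :: d :: e :: f :: g :: rest) 3 = d := by
      rw [mmV_pos _ _ 3 (by norm_num)]; norm_num [mmV_pos, mmV_zero_cons]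
    have v4 : mmV (a :: b :: c :: d :: e :: f :: g :: rest) 4 = e := by
      rw [mmV_pos _ _ 4 (by norm_num)]; norm_num [mmV_pos, mmV_zero_cons]
    have v5 : mmV (a :: b :: c :: d :: e :: f :: g :: rest) 5 = f := by
      rw [mmV_pos _ _ 5 (by norm_num)]; norm_num [mmV_pos, mmV_zero_cons]
    have v6 : mmV (a :: b :: c :: d :: e :: f :: g :: rest) 6 = g := by
      rw [mmV_pos _ _ 6 (by norm_num)]; norm_num [mmV_pos, mmV_zero_cons]
    constructor
    · unfold wF
      norm_num [v0, v1, v2, v3, v4, v5, v6, List.foldl, i5]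
    · unfold wB
      norm_num [v0, v1, v2, v3, v4, v5, v6, List.foldl, ib]

-- ===== VERDICT (by name: the statement is the Claim_ definition above) =====
theorem max_mark_spec : Claim_equal_max_mark := by
  intro n m _ hpre
  unfold Spec_max_mark max_mark max_mark_alt
  by_cases hn : n < 7
  · simp [hn]
  · rw [if_neg hn, if_neg hn]
    have hn7 : 7 ≤ n := by omega
    have hlen : 7 ≤ m.length := by
      rcases hpre with h | h
      · omega
      · omega
    obtain ⟨hF, hB⟩ := init_state m hlen
    simp only [hF, hB]
    -- split window 0 off A's range
    have h0 : (0 : Int) < n - 6 := by omega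
    rw [PySem.List.pyRange_one_cons h0, List.foldl_cons, foldl_astep]
    have ha0 : (if (mmInner m 0 (PySem.List.pyRange 0 7 1) 0).1 ≥ -1 ∧
          (mmInner m 0 (PySem.List.pyRange 0 7 1) 0).2 = false
        then (mmInner m 0 (PySem.List.pyRange 0 7 1) 0).1 else (-1 : Int)) = gstep m (-1) 0 :=
      astep_eq m (-1) 0
    rw [ha0]
    simp only [zero_add]
    have hM0 : (if wB m 0 = 0 then wF m 0 else (-1 : Int)) = gstep m (-1) 0 := by
      unfold gstep
      by_cases h : wB m 0 = 0
      · have hnn : (-1 : Int) ≤ wF m 0 := by have := wF_nonneg m 0; omega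
        simp [h, max_eq_right hnn]
      · simp [h]
    rw [hM0]
    have hinv := loop_inv m (n - 7).toNat 1 (gstep m (-1) 0)
    simp only [show (1 : Int) - 1 = 0 from by norm_num] at hinv
    rw [show (1 : Int) + ((n - 7).toNat : Int) = n - 6 from by omega] at hinv
    exact hinv.symm
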